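-- pv_equiv track=rewrite | github.com/TheTeodora22/HTMLClones | main.py | group_files
-- ===== SOURCE A (Python) =====
-- def group_files(filenames, clusters):
--     groups = {}
--     for filename, cluster_id in zip(filenames, clusters):
--         if cluster_id not in groups:
--             groups[cluster_id] = []
--         groups[cluster_id].append(filename)
--     # Sort groups by cluster id and filenames
--     sorted_groups = sorted(groups.values(), key=lambda x: (len(x), x))
--     return sorted_groups
-- ===== SOURCE B (Python) =====
-- def group_files(filenames, clusters):
--     pairs = sorted(zip(filenames, clusters), key=lambda p: p[1])  # stable sort by cluster id
--     groups = []
--     i = 0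
--     n = len(pairs)
--     while i < n:  # one linear scan emits each run of equal cluster ids as a group
--         c = pairs[i][1]
--         j = i + 1
--         while j < n and pairs[j][1] == c:
--             j += 1
--         groups.append([f for f, _ in pairs[i:j]])
--         i = j
--     return sorted(groups, key=lambda x: (len(x), x))
-- ===== Notes on version B (the rewrite author's own statement) =====
-- stated objective: alternative
-- what changed: Replaces hash-based grouping (a dict accumulating a list per cluster id) by sort-then-linear-scan grouping: the (filename, cluster) pairs are stably sorted by cluster id and one scan emits each run of equal ids as a group; the final (len, group) sort is unchanged.
import Mathlib
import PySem

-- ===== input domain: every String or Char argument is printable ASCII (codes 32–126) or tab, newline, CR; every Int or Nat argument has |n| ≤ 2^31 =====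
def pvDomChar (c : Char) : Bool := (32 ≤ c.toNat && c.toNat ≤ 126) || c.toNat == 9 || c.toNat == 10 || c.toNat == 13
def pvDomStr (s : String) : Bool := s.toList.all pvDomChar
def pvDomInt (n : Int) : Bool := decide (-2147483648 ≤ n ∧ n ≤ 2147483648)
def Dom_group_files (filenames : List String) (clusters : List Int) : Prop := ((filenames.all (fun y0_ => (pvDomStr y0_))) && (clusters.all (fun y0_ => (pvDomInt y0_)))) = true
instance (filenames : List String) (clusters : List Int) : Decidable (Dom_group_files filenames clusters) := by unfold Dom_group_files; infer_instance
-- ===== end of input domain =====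

-- B replaces A's hash-based grouping (dict accumulating a list per cluster id) by a stable sort of
-- the (filename, cluster) pairs by cluster id followed by one linear scan emitting each run of
-- equal ids as a group; the final (len, group) sort is the same (objective: alternative).

-- ===== PORT A =====
def group_files (filenames : List String) (clusters : List Int) : List (List String) :=
  let groups : PySem.Dict Int (List String) :=
    (filenames.zip clusters).foldl
      (fun g p =>
        let g := if g.contains p.2 then g else g.insert p.2 ([] : List String)
        g.insert p.2 (g.getD p.2 [] ++ [p.1]))
      PySem.Dict.empty
  PySem.List.sorted2 groups.values (fun x => (x.length : Int)) (fun x => x)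

-- ===== PORT B =====
-- the inner while-scan of Source B: split off the run of pairs sharing the head's cluster id
def gbRuns : List (String × Int) → List (List String)
  | [] => []
  | (f, c) :: rest =>
      (f :: (rest.takeWhile (fun p => p.2 == c)).map (fun p => p.1)) ::
        gbRuns (rest.dropWhile (fun p => p.2 == c))
termination_by l => l.length
decreasing_by
  have := (List.dropWhile_sublist (l := rest) (fun p => p.2 == c)).length_le
  simp; omega

def group_files_alt (filenames : List String) (clusters : List Int) : List (List String) :=
  let pairs := PySem.List.sorted (filenames.zip clusters) (fun p => p.2)
  let groups := gbRuns pairs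
  PySem.List.sorted2 groups (fun x => (x.length : Int)) (fun x => x)

-- ===== PRECONDITION & SPEC =====
def Spec_group_files (filenames : List String) (clusters : List Int) (out : List (List String)) : Prop := out = group_files_alt filenames clusters
instance (filenames : List String) (clusters : List Int) (out : List (List String)) : Decidable (Spec_group_files filenames clusters out) := by unfold Spec_group_files; infer_instance

-- ===== CLAIM (what is proved, stated in full; the proofs are below) =====
def Claim_equal_group_files : Prop := ∀ (filenames : List String) (clusters : List Int), Dom_group_files filenames clusters → Spec_group_files filenames clusters (group_files filenames clusters)

-- ===== LEMMAS AND PROOFS =====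

-- A's loop body ('if k not in groups: groups[k]=[]' then append) is exactly dict-modify.
theorem stepA_eq_modify (g : PySem.Dict Int (List String)) (p : String × Int) :
    (let g' := if g.contains p.2 then g else g.insert p.2 ([] : List String)
     g'.insert p.2 (g'.getD p.2 [] ++ [p.1]))
    = g.modify p.2 [] (fun v => v ++ [p.1]) := by
  by_cases h : g.contains p.2 = true
  · simp [h, PySem.Dict.modify]
  · simp only [h, Bool.false_eq_true, if_false, PySem.Dict.modify,
      PySem.Dict.getD_insert_self, PySem.Dict.insert_insert_self,
      PySem.Dict.getD_of_not_contains g ([] : List String) (by simpa using h)]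

-- the values of A's dict: first-occurrence cluster ids, each mapped to its filtered filenames
theorem valuesA (pairs : List (String × Int)) :
    (pairs.foldl (fun g p => g.modify p.2 [] (fun v => v ++ [p.1]))
        (PySem.Dict.empty : PySem.Dict Int (List String))).values
    = (PySem.Set.ofList (pairs.map (fun p => p.2))).map
        (fun c => (pairs.filter (fun p => p.2 == c)).map (fun p => p.1)) := by
  have hnd : (pairs.foldl (fun g p => g.modify p.2 [] (fun v => v ++ [p.1]))
      (PySem.Dict.empty : PySem.Dict Int (List String))).keys.Nodup := by
    exact PySem.Dict.nodup_keys_foldl_modify_key pairs (fun p => p.2) []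
      (fun _ p v => v ++ [p.1]) PySem.Dict.empty (by simp)
  rw [PySem.Dict.values_eq_map_keys _ hnd ([] : List String)]
  have hkeys : (pairs.foldl (fun g p => g.modify p.2 [] (fun v => v ++ [p.1]))
      (PySem.Dict.empty : PySem.Dict Int (List String))).keys
      = PySem.Set.ofList (pairs.map (fun p => p.2)) := by
    rw [PySem.Dict.keys_foldl_modify_key pairs (fun p => p.2) []
      (fun _ p v => v ++ [p.1]) PySem.Dict.empty]
    simp [PySem.Set.update, PySem.Set.ofList_eq_foldl, PySem.Dict.keys_empty]
  rw [hkeys]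
  apply List.map_congr_left
  intro c _
  have hswap : pairs.foldl (fun g p => g.modify p.2 [] (fun v => v ++ [p.1]))
      (PySem.Dict.empty : PySem.Dict Int (List String))
      = ((pairs.map (fun p => (p.2, p.1))).foldl
          (fun g q => g.modify q.1 [] (fun v => v ++ [q.2])) PySem.Dict.empty) := by
    rw [List.foldl_map]
  rw [hswap, PySem.Dict.getD_foldl_modify_append]
  simp [List.filter_map, List.map_map, Function.comp_def]

-- STABILITY of the first sort: filtering one cluster id out of the sorted pairs gives the
-- same list as filtering the original pairs.
theorem filter_insertBy (x : String × Int) (c : Int) :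
    ∀ ys : List (String × Int), ys.Pairwise (fun a b => a.2 ≤ b.2) →
    (PySem.List.insertBy (fun a b => decide (a.2 < b.2)) x ys).filter (fun p => p.2 == c)
    = if x.2 = c then ys.filter (fun p => p.2 == c) ++ [x]
      else ys.filter (fun p => p.2 == c) := by
  intro ys
  induction ys with
  | nil =>
    intro _
    by_cases h : x.2 = c <;> simp [PySem.List.insertBy, h]
  | cons y ys ih =>
    intro hp
    by_cases hb : x.2 < y.2
    · have hins : PySem.List.insertBy (fun a b => decide (a.2 < b.2)) x (y :: ys)
          = x :: y :: ys := by simp [PySem.List.insertBy, hb]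
      by_cases hxc : x.2 = c
      · have hgt : ∀ z ∈ y :: ys, c < z.2 := by
          intro z hz
          rcases List.mem_cons.mp hz with rfl | hz'
          · omega
          · have : y.2 ≤ z.2 := (List.pairwise_cons.mp hp).1 z hz'
            omega
        have hnil : (y :: ys).filter (fun p => p.2 == c) = [] :=
          List.filter_eq_nil_iff.mpr (fun z hz => by
            have := hgt z hz; simp; omega)
        rw [hins, List.filter_cons, hnil]
        simp [hxc]
      · rw [hins, List.filter_cons]
        simp [hxc]
    · have hins : PySem.List.insertBy (fun a b => decide (a.2 < b.2)) x (y :: ys)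
          = y :: PySem.List.insertBy (fun a b => decide (a.2 < b.2)) x ys := by
        simp [PySem.List.insertBy, hb]
      have ihh := ih (List.pairwise_cons.mp hp).2
      rw [hins, List.filter_cons, ihh, List.filter_cons]
      split_ifs <;> simp

theorem filter_sorted (l : List (String × Int)) (c : Int) :
    (PySem.List.sorted l (fun p => p.2)).filter (fun p => p.2 == c)
    = l.filter (fun p => p.2 == c) := by
  induction l using List.reverseRecOn with
  | nil => simp [PySem.List.sorted]
  | append_singleton l x ih =>
    have hsplit : PySem.List.sorted (l ++ [x]) (fun p => p.2)
        = PySem.List.insertBy (fun a b => decide (a.2 < b.2)) x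
            (PySem.List.sorted l (fun p => p.2)) := by
      rw [PySem.List.sorted_eq_foldl_insertBy, PySem.List.sorted_eq_foldl_insertBy,
        List.foldl_append]
      rfl
    rw [hsplit, filter_insertBy x c _ (PySem.List.sorted_pairwise l (fun p => p.2)),
      List.filter_append]
    split_ifs with h <;> simp [ih, h]

-- building PySem.Set.ofList around a leading run of one repeated id
theorem foldl_add_mem (c : Int) : ∀ (ws : List Int) (acc : PySem.Set Int), c ∈ acc →
    (∀ w ∈ ws, w = c) → List.foldl PySem.Set.add acc ws = acc := by
  intro ws
  induction ws with
  | nil => intro acc _ _; rfl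
  | cons w ws ih =>
    intro acc hc hall
    have hw : w = c := hall w (by simp)
    have : PySem.Set.add acc w = acc := by
      simp [PySem.Set.add, PySem.Set.contains, hw, hc]
    rw [List.foldl_cons, this]
    exact ih acc hc (fun v hv => hall v (by simp [hv]))

theorem foldl_add_cons_notmem (c : Int) : ∀ (vs : List Int), (∀ v ∈ vs, v ≠ c) →
    ∀ acc : PySem.Set Int, List.foldl PySem.Set.add (c :: acc) vs
      = c :: List.foldl PySem.Set.add acc vs := by
  intro vs
  induction vs with
  | nil => intro _ _; rfl
  | cons v vs ih =>
    intro hall acc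
    have hv : v ≠ c := hall v (by simp)
    have hstep : PySem.Set.add (c :: acc) v = c :: PySem.Set.add acc v := by
      simp [PySem.Set.add, PySem.Set.contains, hv]
      split_ifs <;> simp
    rw [List.foldl_cons, hstep, ih (fun u hu => hall u (by simp [hu]))]
    simp [List.foldl_cons]

theorem ofList_run (c : Int) (tws dws : List Int)
    (htw : ∀ x ∈ tws, x = c) (hdw : ∀ x ∈ dws, x ≠ c) :
    PySem.Set.ofList (c :: tws ++ dws) = c :: PySem.Set.ofList dws := by
  rw [PySem.Set.ofList_eq_foldl, PySem.Set.ofList_eq_foldl]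
  have h0 : PySem.Set.add [] c = [c] := rfl
  simp only [List.foldl_cons, h0, List.foldl_append]
  rw [foldl_add_mem c tws [c] (by simp) htw]
  exact foldl_add_cons_notmem c dws hdw ([] : PySem.Set Int)

-- the linear scan over the key-sorted pairs produces, for each distinct id in order,
-- the filenames whose pair carries that id
theorem gbRuns_eq (l : List (String × Int)) (h : l.Pairwise (fun a b => a.2 ≤ b.2)) :
    gbRuns l = (PySem.Set.ofList (l.map (fun p => p.2))).map
        (fun c => (l.filter (fun p => p.2 == c)).map (fun p => p.1)) := by
  induction hl : l.length using Nat.strong_induction_on generalizing l with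
  | _ n ih =>
  match l, h with
  | [], _ => simp [gbRuns, PySem.Set.ofList]
  | (f, c) :: rest, h =>
    have hrest := (List.pairwise_cons.mp h).2
    have hle : ∀ z ∈ rest, c ≤ z.2 := (List.pairwise_cons.mp h).1
    set tw := rest.takeWhile (fun p => p.2 == c) with htw
    set dw := rest.dropWhile (fun p => p.2 == c) with hdw
    have hsplit : tw ++ dw = rest := List.takeWhile_append_dropWhile
    have htwc : ∀ z ∈ tw, z.2 = c := fun z hz => by
      simpa using List.mem_takeWhile_imp hz
    have hdwsub : dw.Sublist rest := by rw [hdw]; exact List.dropWhile_sublist _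
    have hdwp : dw.Pairwise (fun a b => a.2 ≤ b.2) := hrest.sublist hdwsub
    have hdwgt : ∀ z ∈ dw, c < z.2 := by
      intro z hz
      cases hdwc : dw with
      | nil => rw [hdwc] at hz; simp at hz
      | cons d dw' =>
        have hdne : d.2 ≠ c := by
          have h5 := List.head?_dropWhile_not (fun p => p.2 == c) rest
          rw [← hdw, hdwc] at h5
          simpa using h5
        have hdmem : d ∈ dw := by rw [hdwc]; simp
        have hdle : c ≤ d.2 := hle d (hdwsub.mem hdmem)
        rw [hdwc] at hz
        rcases List.mem_cons.mp hz with rfl | hz'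
        · omega
        · have : d.2 ≤ z.2 := (List.pairwise_cons.mp (hdwc ▸ hdwp)).1 z hz'
          omega
    have hkeys : ((f, c) :: rest).map (fun p => p.2) = c :: tw.map (fun p => p.2) ++ dw.map (fun p => p.2) := by
      simp [← hsplit]
    have hset : PySem.Set.ofList (((f, c) :: rest).map (fun p => p.2))
        = c :: PySem.Set.ofList (dw.map (fun p => p.2)) := by
      rw [hkeys]
      exact ofList_run c _ _ (by intro x hx; rcases List.mem_map.mp hx with ⟨z, hz, rfl⟩; exact htwc z hz)
        (by intro x hx; rcases List.mem_map.mp hx with ⟨z, hz, rfl⟩; exact Int.ne_of_gt (hdwgt z hz))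
    have hfc : ((f, c) :: rest).filter (fun p => p.2 == c) = (f, c) :: tw := by
      have h1 : tw.filter (fun p => p.2 == c) = tw :=
        List.filter_eq_self.mpr (fun z hz => by simpa using htwc z hz)
      have h2 : dw.filter (fun p => p.2 == c) = [] :=
        List.filter_eq_nil_iff.mpr (fun z hz => by simpa using Int.ne_of_gt (hdwgt z hz))
      simp [← hsplit, List.filter_append, h1, h2]
    have hgrp : ∀ c' ∈ PySem.Set.ofList (dw.map (fun p => p.2)),
        ((f, c) :: rest).filter (fun p => p.2 == c') = dw.filter (fun p => p.2 == c') := by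
      intro c' hc'
      have hc'mem : c' ∈ dw.map (fun p => p.2) := (PySem.Set.mem_ofList _ _).mp hc'
      rcases List.mem_map.mp hc'mem with ⟨z, hz, rfl⟩
      have hcne : c ≠ z.2 := Int.ne_of_lt (hdwgt z hz)
      have h1 : tw.filter (fun p => p.2 == z.2) = [] :=
        List.filter_eq_nil_iff.mpr (fun w hw => by
          have := htwc w hw; simp [this]; omega)
      simp [← hsplit, List.filter_append, h1, (by omega : ¬ (c = z.2))]
    have hdwlen : dw.length < n := by
      have h1 := hdwsub.length_le
      simp at hl; omega
    have ihdw := ih dw.length hdwlen dw hdwp rfl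
    rw [show gbRuns ((f, c) :: rest)
        = (f :: tw.map (fun p => p.1)) :: gbRuns dw from by rw [gbRuns], ihdw, hset]
    simp only [List.map_cons, hfc, List.map_cons]
    congr 1
    exact (List.map_congr_left (fun c' hc' => by rw [hgrp c' hc'])).symm

-- the comparison the final sorted2 call uses, and its order facts
def gfBefore (a b : List String) : Bool :=
  decide ((a.length : Int) < (b.length : Int)) ||
    (!decide ((b.length : Int) < (a.length : Int)) && decide (a < b))

theorem gfBefore_asymm {a b : List String} (h : gfBefore a b = true) : gfBefore b a = false := by
  simp [gfBefore] at h ⊢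
  rcases h with h | ⟨h1, h2⟩
  · constructor
    · omega
    · intro; omega
  · constructor
    · omega
    · intro; exact le_of_lt h2
  
theorem gfBefore_trans {a b c : List String}
    (h1 : gfBefore a b = true) (h2 : gfBefore b c = true) : gfBefore a c = true := by
  simp [gfBefore] at h1 h2 ⊢
  rcases h1 with h1 | ⟨h1a, h1b⟩ <;> rcases h2 with h2 | ⟨h2a, h2b⟩
  · left; omega
  · left; omega
  · left; omega
  · right
    exact ⟨by omega, lt_trans h1b h2b⟩

theorem gfBefore_eq_of_not {a b : List String}
    (h1 : gfBefore a b = false) (h2 : gfBefore b a = false) : a = b := by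
  simp [gfBefore] at h1 h2
  have hlen : a.length = b.length := by omega
  have ha := h1.2 (by omega)
  have hb := h2.2 (by omega)
  exact le_antisymm hb ha

theorem insertBy_gfBefore_pairwise (x : List String) :
    ∀ ys : List (List String), ys.Pairwise (fun a b => gfBefore b a = false) →
    (PySem.List.insertBy gfBefore x ys).Pairwise (fun a b => gfBefore b a = false) := by
  intro ys
  induction ys with
  | nil => intro _; simp [PySem.List.insertBy]
  | cons y ys ih =>
    intro hp
    rcases List.pairwise_cons.mp hp with ⟨hy, hys⟩
    by_cases hb : gfBefore x y = true
    · simp only [PySem.List.insertBy, hb, if_true]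
      refine List.pairwise_cons.mpr ⟨?_, hp⟩
      intro z hz
      rcases List.mem_cons.mp hz with rfl | hz
      · exact gfBefore_asymm hb
      · -- gfBefore z x must be false; else gfBefore z y would be true, contradicting hy
        by_contra hzx
        have hzx' : gfBefore z x = true := by simpa using hzx
        have := gfBefore_trans hzx' hb
        rw [hy z hz] at this
        exact Bool.false_ne_true this
    · simp only [PySem.List.insertBy, hb]
      refine List.pairwise_cons.mpr ⟨?_, ih hys⟩
      intro z hz
      rcases (PySem.List.insertBy_mem_iff _ _ _ _).mp hz with rfl | hz
      · simpa using hb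
      · exact hy z hz

theorem foldl_insertBy_pairwise (xs : List (List String)) :
    ∀ acc : List (List String), acc.Pairwise (fun a b => gfBefore b a = false) →
    (xs.foldl (fun acc x => PySem.List.insertBy gfBefore x acc) acc).Pairwise
      (fun a b => gfBefore b a = false) := by
  induction xs with
  | nil => intro acc h; exact h
  | cons x xs ih => intro acc h; exact ih _ (insertBy_gfBefore_pairwise x acc h)

theorem sorted2_eq_foldl (xs : List (List String)) :
    PySem.List.sorted2 xs (fun x => (x.length : Int)) (fun x => x)
    = xs.foldl (fun acc x => PySem.List.insertBy gfBefore x acc) [] := rfl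

-- sorted2 with the (len, identity) key is insensitive to the order of its input list
theorem sorted2_eq_of_perm (xs ys : List (List String)) (hperm : xs.Perm ys) :
    PySem.List.sorted2 xs (fun x => (x.length : Int)) (fun x => x)
    = PySem.List.sorted2 ys (fun x => (x.length : Int)) (fun x => x) := by
  apply List.Perm.eq_of_pairwise (le := fun a b => gfBefore b a = false)
  · intro a b _ _ h1 h2
    exact gfBefore_eq_of_not h2 h1
  · rw [sorted2_eq_foldl]; exact foldl_insertBy_pairwise xs [] List.Pairwise.nil
  · rw [sorted2_eq_foldl]; exact foldl_insertBy_pairwise ys [] List.Pairwise.nil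
  · exact (PySem.List.sorted2_perm xs _ _ _).trans
      (hperm.trans (PySem.List.sorted2_perm ys _ _ _).symm)

-- ===== VERDICT (by name: the statement is the Claim_ definition above) =====
theorem group_files_spec : Claim_equal_group_files := by
  intro filenames clusters _
  unfold Spec_group_files
  simp only [group_files, group_files_alt]
  have hstep : (filenames.zip clusters).foldl
      (fun g p =>
        let g := if g.contains p.2 then g else g.insert p.2 ([] : List String)
        g.insert p.2 (g.getD p.2 [] ++ [p.1]))
      PySem.Dict.empty
      = (filenames.zip clusters).foldl (fun g p => g.modify p.2 [] (fun v => v ++ [p.1]))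
          PySem.Dict.empty := by
    exact PySem.List.foldl_congr_mem _ _ _ _ (fun g p _ => stepA_eq_modify g p)
  rw [hstep, valuesA]
  set pairs := filenames.zip clusters with hpairs
  set sp := PySem.List.sorted pairs (fun p => p.2) with hsp
  have hruns : gbRuns sp = (PySem.Set.ofList (sp.map (fun p => p.2))).map
      (fun c => (pairs.filter (fun p => p.2 == c)).map (fun p => p.1)) := by
    rw [gbRuns_eq sp (PySem.List.sorted_pairwise pairs (fun p => p.2))]
    exact List.map_congr_left (fun c _ => by rw [filter_sorted])
  rw [hruns]
  apply sorted2_eq_of_perm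
  apply List.Perm.map
  rw [List.perm_ext_iff_of_nodup (PySem.Set.nodup_ofList _) (PySem.Set.nodup_ofList _)]
  intro a
  rw [PySem.Set.mem_ofList, PySem.Set.mem_ofList]
  constructor <;> intro h <;> rcases List.mem_map.mp h with ⟨z, hz, rfl⟩
  · exact List.mem_map.mpr ⟨z, (PySem.List.mem_sorted pairs _ _ z).mpr hz, rfl⟩
  · exact List.mem_map.mpr ⟨z, (PySem.List.mem_sorted pairs _ _ z).mp hz, rfl⟩
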